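-- pv_equiv track=rewrite | github.com/sundar91/dsa | Arrays/SubArray/alternating_k_length.py | alternatingArray
-- ===== SOURCE A (Python) =====
-- def alternatingArray(A, k):
--     left = [0] *len(A)
--     right = [0] * len(A)
--
--     count = 1
--     left[0] = 1
--     for i in range(1,len(A)):
--         if A[i] != A[i-1]:
--             count += 1
--         else:
--             count = 1
--
--         left[i] = count
--
--     right[len(A) - 1] = 1
--     count = 1
--     for i in range(len(A)-2,-1, -1):
--         if A[i] != A[i+1]:
--             count += 1
--         else:
--             count = 1
--
--         right[i] = count
--
--
--
--     return (left,right)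
-- ===== SOURCE B (Python) =====
-- def alternatingArray(A, k):
--     # Different decomposition: split A into maximal alternating runs once,
--     # then emit 1..L and L..1 per run.  k is unused, as in the original.
--     runs = []
--     cur = 1
--     for i in range(1, len(A)):
--         if A[i] == A[i - 1]:
--             runs.append(cur)
--             cur = 1
--         else:
--             cur += 1
--     if A:
--         runs.append(cur)
--     left = []
--     right = []
--     for L in runs:
--         left.extend(range(1, L + 1))
--         right.extend(range(L, 0, -1))
--     return (left, right)
-- ===== Notes on version B (the rewrite author's own statement) =====
-- stated objective: alternative
-- what changed: Instead of two index-based passes maintaining a running counter and writing into preallocated arrays, B splits A once into maximal alternating runs and emits the ramp 1..L and L..1 for each run; B also returns ([],[]) on empty input where A raises IndexError.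
import Mathlib
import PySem

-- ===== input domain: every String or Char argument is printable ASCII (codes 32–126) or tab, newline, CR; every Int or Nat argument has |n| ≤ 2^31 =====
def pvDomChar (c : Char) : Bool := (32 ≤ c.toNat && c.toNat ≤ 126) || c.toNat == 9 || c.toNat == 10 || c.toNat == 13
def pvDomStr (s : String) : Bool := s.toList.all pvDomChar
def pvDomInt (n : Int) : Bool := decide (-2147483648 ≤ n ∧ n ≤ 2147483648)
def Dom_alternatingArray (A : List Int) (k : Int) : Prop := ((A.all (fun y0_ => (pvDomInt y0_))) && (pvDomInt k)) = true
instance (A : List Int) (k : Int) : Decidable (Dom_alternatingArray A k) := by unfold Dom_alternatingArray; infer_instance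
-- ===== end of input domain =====

-- B replaces A's two counter-carrying index loops by a single split into maximal
-- alternating runs, emitting the ramps 1..L and L..1 per run (objective: alternative,
-- same O(n) cost); on empty input A raises IndexError, B returns ([], []).

-- ===== PORT A =====
-- Loop indices are nonnegative and in range on every admitted input (A ≠ []),
-- so A[i], A[i-1], A[i+1] are ported with getD; left[0]=1 / right[n-1]=1 on the
-- empty list raise IndexError in Python, excluded by Pre_.
def alternatingArray (A : List Int) (k : Int) : List Int × List Int :=
  let n := A.length
  let left := (List.replicate n (0 : Int)).set 0 1
  let fwd := (List.range' 1 (n - 1)).foldl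
    (fun (st : Int × List Int) i =>
      let count := if A.getD i 0 ≠ A.getD (i - 1) 0 then st.1 + 1 else 1
      (count, st.2.set i count)) (1, left)
  let right := (List.replicate n (0 : Int)).set (n - 1) 1
  let bwd := ((List.range (n - 1)).reverse).foldl
    (fun (st : Int × List Int) i =>
      let count := if A.getD i 0 ≠ A.getD (i + 1) 0 then st.1 + 1 else 1
      (count, st.2.set i count)) (1, right)
  (fwd.2, bwd.2)

-- ===== PORT B =====
-- run lengths of the maximal alternating runs (Source B's first loop, scanned structurally)
def runLens : Int → Nat → List Int → List Nat
  | _, len, [] => [len]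
  | prev, len, b :: t => if b = prev then len :: runLens b 1 t else runLens b (len + 1) t

def alternatingArray_alt (A : List Int) (k : Int) : List Int × List Int :=
  match A with
  | [] => ([], [])
  | a :: t =>
    let rs := runLens a 1 t
    ((rs.map (fun L => (List.range' 1 L).map Int.ofNat)).flatten,
     (rs.map (fun L => ((List.range' 1 L).reverse).map Int.ofNat)).flatten)

-- ===== PRECONDITION & SPEC =====
-- Pre_ excludes only the empty list, on which Python A raises IndexError (left[0] = 1).
def Pre_alternatingArray (A : List Int) (k : Int) : Prop := A ≠ []
instance (A : List Int) (k : Int) : Decidable (Pre_alternatingArray A k) := by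
  unfold Pre_alternatingArray; infer_instance

def pvWitness_alternatingArray : List Int × Int := ([1, 2, 2, 3], 0)

def Spec_alternatingArray (A : List Int) (k : Int) (out : List Int × List Int) : Prop :=
  out = alternatingArray_alt A k
instance (A : List Int) (k : Int) (out : List Int × List Int) : Decidable (Spec_alternatingArray A k out) := by
  unfold Spec_alternatingArray; infer_instance

-- ===== CLAIM (what is proved, stated in full; the proofs are below) =====
def Claim_equal_alternatingArray : Prop := ∀ (A : List Int) (k : Int),
  Dom_alternatingArray A k → Pre_alternatingArray A k →
  Spec_alternatingArray A k (alternatingArray A k)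

-- ===== LEMMAS AND PROOFS =====

-- forward counts continuing from previous element `prev` and count `c`
def g : Int → Int → List Int → List Int
  | _, _, [] => []
  | prev, c, b :: t =>
    let c' := if b ≠ prev then c + 1 else 1
    c' :: g b c' t

-- backward counts (right-to-left run positions), structurally from the left
def countsBwd : List Int → List Int
  | [] => []
  | [_] => [1]
  | a :: b :: t => (if a ≠ b then (countsBwd (b :: t)).headD 0 + 1 else 1) :: countsBwd (b :: t)

-- length of the first maximal alternating run of prev :: t
def frun : Int → List Int → Nat
  | _, [] => 1
  | prev, b :: t => if b ≠ prev then frun b t + 1 else 1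

lemma countsBwd_cons_cons (a b : Int) (t : List Int) :
    countsBwd (a :: b :: t)
    = (if a ≠ b then (countsBwd (b :: t)).headD 0 + 1 else 1) :: countsBwd (b :: t) := by
  simp [countsBwd]

lemma head_countsBwd : ∀ (t : List Int) (prev : Int),
    (countsBwd (prev :: t)).headD 0 = Int.ofNat (frun prev t) := by
  intro t
  induction t with
  | nil => intro prev; simp [countsBwd, frun]
  | cons b t ih =>
    intro prev
    by_cases h : prev = b
    · simp [countsBwd, frun, h]
    · have h3 : prev ≠ b := h
      have h' : b ≠ prev := fun hb => h hb.symm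
      rw [countsBwd_cons_cons, if_pos h3]
      simp only [List.headD_cons]
      rw [ih b]
      simp only [frun, if_pos h', Int.ofNat_eq_natCast]
      push_cast; ring

lemma fwd_inv (A : List Int) : ∀ (m s : Nat) (c : Int) (pre : List Int),
    pre.length = s → 1 ≤ s → s + m = A.length →
    (((List.range' s m).foldl
      (fun (st : Int × List Int) i =>
        let count := if A.getD i 0 ≠ A.getD (i - 1) 0 then st.1 + 1 else 1
        (count, st.2.set i count)) (c, pre ++ List.replicate m 0)).2)
    = pre ++ g (A.getD (s - 1) 0) c (A.drop s) := by
  intro m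
  induction m with
  | zero =>
    intro s c pre hlen hs hsum
    have : A.drop s = [] := by
      apply List.drop_eq_nil_of_le; omega
    simp [this, g]
  | succ m ih =>
    intro s c pre hlen hs hsum
    have hslt : s < A.length := by omega
    have hdrop : A.drop s = A[s] :: A.drop (s + 1) := List.drop_eq_getElem_cons hslt
    have hgetD : A.getD s 0 = A[s] := List.getD_eq_getElem A 0 hslt
    rw [List.range'_succ, List.foldl_cons]
    simp only
    set c' : Int := if A.getD s 0 ≠ A.getD (s - 1) 0 then c + 1 else 1 with hc'
    have hset : (pre ++ List.replicate (m + 1) 0).set s c'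
        = (pre ++ [c']) ++ List.replicate m 0 := by
      rw [List.set_append_right _ _ (by omega)]
      simp [hlen, List.replicate_succ]
    rw [hset]
    rw [hdrop]
    have hg2 : g (A.getD (s - 1) 0) c (A[s] :: A.drop (s + 1))
        = c' :: g A[s] c' (A.drop (s + 1)) := by
      rw [show g (A.getD (s - 1) 0) c (A[s] :: A.drop (s + 1))
          = (if A[s] ≠ A.getD (s - 1) 0 then c + 1 else 1)
            :: g A[s] (if A[s] ≠ A.getD (s - 1) 0 then c + 1 else 1) (A.drop (s + 1)) from rfl,
        ← hgetD]
    rw [hg2]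
    have hIH := ih (s + 1) c' (pre ++ [c']) (by simp [hlen]) (by omega) (by omega)
    rw [show s + 1 - 1 = s from by omega, hgetD] at hIH
    simpa [List.append_assoc] using hIH

lemma bwd_inv (A : List Int) : ∀ (m : Nat), m + 1 ≤ A.length →
    ((((List.range m).reverse).foldl
      (fun (st : Int × List Int) i =>
        let count := if A.getD i 0 ≠ A.getD (i + 1) 0 then st.1 + 1 else 1
        (count, st.2.set i count))
      ((countsBwd (A.drop m)).headD 0, List.replicate m 0 ++ countsBwd (A.drop m))).2)
    = countsBwd A := by
  intro m
  induction m with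
  | zero => intro _; simp
  | succ m ih =>
    intro h
    have hm : m < A.length := by omega
    have hm1 : m + 1 < A.length := by omega
    have hdrop : A.drop m = A[m] :: A.drop (m + 1) := List.drop_eq_getElem_cons hm
    have hdrop1 : A.drop (m + 1) = A[m + 1] :: A.drop (m + 2) := List.drop_eq_getElem_cons hm1
    have hg : A.getD m 0 = A[m] := List.getD_eq_getElem A 0 hm
    have hg1 : A.getD (m + 1) 0 = A[m + 1] := List.getD_eq_getElem A 0 hm1
    rw [List.range_succ, List.reverse_append, List.reverse_singleton, List.singleton_append,
      List.foldl_cons]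
    simp only
    set r := countsBwd (A.drop (m + 1)) with hr
    set c' : Int := if A.getD m 0 ≠ A.getD (m + 1) 0 then (countsBwd (A.drop (m + 1))).headD 0 + 1 else 1
      with hc'
    have hcb : countsBwd (A.drop m) = c' :: countsBwd (A.drop (m + 1)) := by
      rw [hdrop, hdrop1, countsBwd_cons_cons, ← hdrop1, hc', hg, hg1]
    have hset : (List.replicate (m + 1) (0 : Int) ++ countsBwd (A.drop (m + 1))).set m c'
        = List.replicate m 0 ++ countsBwd (A.drop m) := by
      have : List.replicate (m + 1) (0 : Int) = List.replicate m 0 ++ [0] :=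
        List.replicate_succ' ..
      rw [this, List.append_assoc, List.set_append_right _ _ (by simp),
        List.length_replicate, Nat.sub_self]
      simp [hcb]
    have hcount : (countsBwd (A.drop m)).headD 0 = c' := by rw [hcb]; rfl
    have goal1 : ((countsBwd (A.drop (m+1))).headD 0 : Int) = (countsBwd (A.drop (m+1))).headD 0 := rfl
    rw [show (List.replicate (m + 1) (0:Int) ++ countsBwd (A.drop (m + 1))).set m
        (if A.getD m 0 ≠ A.getD (m + 1) 0 then (countsBwd (A.drop (m + 1))).headD 0 + 1 else 1)
        = List.replicate m 0 ++ countsBwd (A.drop m) from hset]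
    rw [← hcount] at *
    exact ih (by omega)

lemma runs_left : ∀ (t : List Int) (prev : Int) (len : Nat),
    ((runLens prev len t).map (fun L => (List.range' 1 L).map Int.ofNat)).flatten
    = (List.range' 1 len).map Int.ofNat ++ g prev (Int.ofNat len) t := by
  intro t
  induction t with
  | nil => intro prev len; simp [runLens, g]
  | cons b t ih =>
    intro prev len
    by_cases h : b = prev
    · have h2 : ¬ (b ≠ prev) := by simp [h]
      simp only [runLens, if_pos h, List.map_cons, List.flatten_cons, g, h2, if_neg h2]
      rw [ih b 1]
      simp
    · have h2 : (b ≠ prev) := h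
      simp only [runLens, if_neg h, g, if_pos h2]
      rw [ih b (len + 1)]
      have hr : List.range' 1 (len + 1) = List.range' 1 len ++ [1 + len] := by
        simp [List.range'_concat]
      rw [hr]
      simp only [List.map_append, List.map_cons, List.map_nil, List.append_assoc,
        List.singleton_append, Int.ofNat_eq_natCast, List.cons_append, List.nil_append]
      push_cast
      ring_nf

lemma runs_right : ∀ (t : List Int) (prev : Int) (len : Nat), 1 ≤ len →
    ((runLens prev len t).map (fun L => ((List.range' 1 L).reverse).map Int.ofNat)).flatten
    = ((List.range' (frun prev t + 1) (len - 1)).reverse).map Int.ofNat ++ countsBwd (prev :: t) := by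
  intro t
  induction t with
  | nil =>
    intro prev len hlen
    have : List.range' 1 len = 1 :: List.range' 2 (len - 1) := by
      have : len = (len - 1) + 1 := by omega
      rw [this, List.range'_succ]
      congr 1
    simp only [runLens, List.map_cons, List.map_nil, List.flatten_cons, List.flatten_nil,
      List.append_nil, frun, countsBwd, this]
    simp
  | cons b t ih =>
    intro prev len hlen
    by_cases h : b = prev
    · have h2 : ¬ (b ≠ prev) := by simp [h]
      have h3 : ¬ (prev ≠ b) := by simp [h]
      simp only [runLens, if_pos h, List.map_cons, List.flatten_cons,
        countsBwd_cons_cons, if_neg h3, frun, if_neg h2]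
      rw [ih b 1 (by omega)]
      have hr : List.range' 1 len = 1 :: List.range' 2 (len - 1) := by
        have : len = (len - 1) + 1 := by omega
        rw [this, List.range'_succ]; congr 1
      rw [hr]
      simp
    · have h2 : (b ≠ prev) := h
      have h3 : (prev ≠ b) := fun e => h e.symm
      simp only [runLens, if_neg h, countsBwd_cons_cons, if_pos h3, frun, if_pos h2]
      rw [ih b (len + 1) (by omega)]
      have hr : List.range' (frun b t + 1) ((len + 1) - 1)
          = (frun b t + 1) :: List.range' (frun b t + 2) (len - 1) := by
        have : (len + 1) - 1 = (len - 1) + 1 := by omega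
        rw [this, List.range'_succ]
      rw [hr, head_countsBwd]
      simp only [List.reverse_cons, List.map_append, List.map_cons, List.map_nil,
        List.append_assoc, List.cons_append, List.nil_append, List.singleton_append,
        Int.ofNat_eq_natCast]
      push_cast
      ring_nf

lemma countsBwd_singleton_of_len (l : List Int) (h : l.length = 1) :
    countsBwd l = [1] := by
  match l, h with
  | [a], _ => rfl

-- ===== VERDICT (by name: the statement is the Claim_ definition above) =====
theorem alternatingArray_spec : Claim_equal_alternatingArray := by
  intro A k _ hpre
  unfold Spec_alternatingArray
  obtain ⟨a, t, rfl⟩ : ∃ a t, A = a :: t := by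
    cases A with
    | nil => exact absurd rfl hpre
    | cons a t => exact ⟨a, t, rfl⟩
  show alternatingArray (a :: t) k = alternatingArray_alt (a :: t) k
  unfold alternatingArray alternatingArray_alt
  simp only [List.length_cons]
  rw [Prod.mk.injEq]
  constructor
  · -- left component
    have hinit : (List.replicate (t.length + 1) (0 : Int)).set 0 1
        = [1] ++ List.replicate ((t.length + 1) - 1) 0 := by
      simp [List.replicate_succ]
    rw [hinit]
    have := fwd_inv (a :: t) ((t.length + 1) - 1) 1 1 [1] (by simp) (by omega)
      (by simp; omega)
    rw [this]
    rw [runs_left t a 1]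
    simp [g]
  · -- right component
    have hcb1 : countsBwd ((a :: t).drop (t.length + 1 - 1)) = [1] := by
      apply countsBwd_singleton_of_len
      simp
    have hinit : (List.replicate (t.length + 1) (0 : Int)).set (t.length + 1 - 1) 1
        = List.replicate (t.length + 1 - 1) 0 ++ countsBwd ((a :: t).drop (t.length + 1 - 1)) := by
      rw [hcb1]
      have : List.replicate (t.length + 1) (0 : Int) = List.replicate t.length 0 ++ [0] :=
        List.replicate_succ' ..
      rw [this, List.set_append_right _ _ (by simp), List.length_replicate]
      simp
    rw [hinit, hcb1]
    have hb := bwd_inv (a :: t) (t.length + 1 - 1) (by simp)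
    rw [hcb1] at hb
    simp only [List.headD_cons] at hb
    rw [hb]
    rw [runs_right t a 1 (by omega)]
    simp
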